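-- pv_equiv track=rewrite | github.com/maciejbiesek/InteligentnyOdkurzacz | Genetic.py | GrayCodeRank
-- ===== SOURCE A (Python) =====
-- def GrayCodeRank(myArray):
--     r = 0
--     b = 0
--     n = len(myArray)
--
--     for i in range(n - 1, -1, -1):
--         if myArray[n - i - 1] == 1:
--             b = 1 - b
--         if b == 1:
--             r += (1 << i)
--     return r
-- ===== SOURCE B (Python) =====
-- def GrayCodeRank(myArray):
--     # Reflection view of Gray codes, built back-to-front: scanning from the
--     # rightmost element, a 1 at the current position reflects the rank decoded
--     # so far into the second half: rank -> half + (half - 1 - rank).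
--     # No XOR/parity state is kept.
--     rank = 0
--     half = 1
--     for x in reversed(list(myArray)):
--         if x == 1:
--             rank = half + (half - 1 - rank)
--         half <<= 1
--     return rank
-- ===== Notes on version B (the rewrite author's own statement) =====
-- stated objective: alternative
-- what changed: A decodes with a running XOR parity bit in one forward-over-elements loop summing 1<<i; B walks the list right-to-left and uses the reflection structure of Gray codes, complementing the rank built so far into the second half (rank -> half + half - 1 - rank) when it meets a 1, with no parity/XOR state at all.
import Mathlib
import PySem

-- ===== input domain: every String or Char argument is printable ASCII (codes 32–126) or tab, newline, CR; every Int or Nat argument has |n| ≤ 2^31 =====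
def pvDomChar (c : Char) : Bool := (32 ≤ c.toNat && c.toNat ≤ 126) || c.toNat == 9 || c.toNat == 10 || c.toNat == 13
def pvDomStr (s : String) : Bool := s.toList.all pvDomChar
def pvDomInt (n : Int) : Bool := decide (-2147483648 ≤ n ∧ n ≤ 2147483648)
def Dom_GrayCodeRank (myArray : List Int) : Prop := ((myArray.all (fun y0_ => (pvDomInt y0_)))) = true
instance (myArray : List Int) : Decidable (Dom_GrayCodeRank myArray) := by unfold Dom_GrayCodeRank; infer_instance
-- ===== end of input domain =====

-- B replaces A's fused backward XOR-parity loop with structural recursion on the reflection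
-- property of Gray codes (a leading 1 complements the tail's rank into the second half);
-- objective: alternative (no parity state, different decomposition).


-- ===== PORT A =====
-- literal transliteration of A: r,b accumulated over range(n-1, -1, -1); 1 << i is (1 <<< i.toNat)
-- (i ≥ 0 throughout the range); myArray[n-i-1] is pyGet?, always in range so the == 1 test is = some 1.
def GrayCodeRank (myArray : List Int) : Int :=
  let n : Int := (myArray.length : Int)
  let rb := (PySem.List.pyRange (n - 1) (-1) (-1)).foldl
    (fun (rb : Int × Int) (i : Int) =>
      let b : Int := if PySem.List.pyGet? myArray (n - i - 1) = some 1 then 1 - rb.2 else rb.2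
      let r : Int := if b = 1 then rb.1 + ((1 : Int) <<< i.toNat) else rb.1
      (r, b)) ((0 : Int), (0 : Int))
  rb.1

-- ===== PORT B =====
-- right-to-left reflection loop: state (rank, half); a 1 reflects rank into the second half,
-- half doubles each step (half <<= 1).
def GrayCodeRank_alt (myArray : List Int) : Int :=
  (myArray.reverse.foldl
    (fun (p : Int × Int) (x : Int) =>
      (if x = 1 then p.2 + (p.2 - 1 - p.1) else p.1, p.2 <<< (1 : Nat))) ((0 : Int), (1 : Int))).1

-- ===== PRECONDITION & SPEC =====
def Spec_GrayCodeRank (myArray : List Int) (out : Int) : Prop := out = GrayCodeRank_alt myArray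
instance (myArray : List Int) (out : Int) : Decidable (Spec_GrayCodeRank myArray out) := by unfold Spec_GrayCodeRank; infer_instance

-- ===== CLAIM (what is proved, stated in full; the proofs are below) =====
def Claim_equal_GrayCodeRank : Prop := ∀ (myArray : List Int), Dom_GrayCodeRank myArray → Spec_GrayCodeRank myArray (GrayCodeRank myArray)

-- ===== LEMMAS AND PROOFS =====

-- recursive form of B's reflection loop (proof helper)
def rankRefl : List Int → Int
  | [] => 0
  | x :: t =>
      let half : Int := (1 : Int) <<< t.length
      let sub : Int := rankRefl t
      if x = 1 then half + (half - 1 - sub) else sub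

-- B's loop computes rankRefl together with half = 1 <<< length
lemma foldB (xs : List Int) :
    xs.reverse.foldl
      (fun (p : Int × Int) (x : Int) =>
        (if x = 1 then p.2 + (p.2 - 1 - p.1) else p.1, p.2 <<< (1 : Nat))) ((0 : Int), (1 : Int))
      = (rankRefl xs, (1 : Int) <<< xs.length) := by
  rw [List.foldl_reverse]
  induction xs with
  | nil => simp [rankRefl]
  | cons x t ih =>
      simp only [List.foldr_cons, ih, rankRefl, List.length_cons]
      have : ((1 : Int) <<< t.length) <<< (1 : Nat) = (1 : Int) <<< (t.length + 1) := by
        simp [Int.shiftLeft_eq, pow_succ]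
      rw [this]

-- A-style value and parity of a suffix, with incoming parity b
def specA : List Int → Int → Int
  | [], _ => 0
  | x :: t, b =>
      let b' := if x = 1 then 1 - b else b
      (if b' = 1 then (2 : Int) ^ t.length else 0) + specA t b'

def parityA : List Int → Int → Int
  | [], b => b
  | x :: t, b => parityA t (if x = 1 then 1 - b else b)

-- A's backward range loop over any suffix: value is specA, parity is parityA
lemma foldA (suf : List Int) : ∀ (pre xs : List Int) (n r b : Int),
    xs = pre ++ suf → n = (pre.length : Int) + suf.length →
    (PySem.List.pyRange ((suf.length : Int) - 1) (-1) (-1)).foldl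
      (fun (rb : Int × Int) (i : Int) =>
        let b : Int := if PySem.List.pyGet? xs (n - i - 1) = some 1 then 1 - rb.2 else rb.2
        let r : Int := if b = 1 then rb.1 + ((1 : Int) <<< i.toNat) else rb.1
        (r, b)) (r, b)
      = (r + specA suf b, parityA suf b) := by
  induction suf with
  | nil =>
      intro pre xs n r b hxs hn
      rw [PySem.List.pyRange_neg_one_eq_nil (by simp)]
      simp [specA, parityA]
  | cons x t ih =>
      intro pre xs n r b hxs hn
      have hlen : ((x :: t).length : Int) - 1 = (t.length : Int) := by simp
      rw [hlen, PySem.List.pyRange_neg_one_cons (by omega)]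
      simp only [List.foldl_cons]
      have hidx : n - (t.length : Int) - 1 = (pre.length : Int) := by
        simp at hn; omega
      have hget : PySem.List.pyGet? xs (n - (t.length : Int) - 1) = some x := by
        rw [hidx, hxs, PySem.List.pyGet?_natCast]
        simp
      rw [hget]
      have hxs' : xs = (pre ++ [x]) ++ t := by simp [hxs]
      have hn' : n = (((pre ++ [x]).length : Nat) : Int) + t.length := by
        simp at hn ⊢; omega
      rw [ih (pre ++ [x]) xs n _ _ hxs' hn']
      have hpow : ((1 : Int) <<< ((t.length : Int)).toNat) = (2 : Int) ^ t.length := by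
        simp [Int.shiftLeft_eq]
      simp only [specA, parityA, hpow, Option.some.injEq]
      by_cases hb' : (if x = 1 then 1 - b else b) = 1 <;> simp [hb'] <;> ring

-- specA with parity 0 is rankRefl; with parity 1 it is the complement 2^n - 1 - rankRefl
lemma specA_refl (xs : List Int) :
    specA xs 0 = rankRefl xs ∧ specA xs 1 = (2 : Int) ^ xs.length - 1 - rankRefl xs := by
  induction xs with
  | nil => simp [specA, rankRefl]
  | cons x t ih =>
      have hpow : ((1 : Int) <<< t.length) = (2 : Int) ^ t.length := by
        simp [Int.shiftLeft_eq]
      by_cases hx : x = 1 <;>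
        simp only [specA, rankRefl, hx, if_true, if_false, hpow, List.length_cons,
          pow_succ, reduceIte] <;>
      constructor <;> simp [hx, ih.1, ih.2] <;> ring

-- ===== VERDICT (by name: the statement is the Claim_ definition above) =====
theorem GrayCodeRank_spec : Claim_equal_GrayCodeRank := by
  intro myArray _
  unfold Spec_GrayCodeRank GrayCodeRank GrayCodeRank_alt
  rw [foldB]
  simp only [foldA myArray [] myArray (myArray.length : Int) 0 0 (List.nil_append myArray).symm
      (by simp), List.nil_append]
  rw [(specA_refl myArray).1]
  simp
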